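-- pv_equiv track=rewrite | github.com/wooktori/algorithm | 프로그래머스/python/LV2/석유 시추.py | solution
-- ===== SOURCE A (Python) =====
-- from collections import deque
--
-- def bfs(j, i, land, visited, n, m):
--     area = 1
--     dx = [1, -1, 0, 0]
--     dy = [0, 0, 1, -1]
--     arr = set()
--     q = deque([(j, i)])
--     visited[j][i] = 1
--     arr.add(i)
--     while q:
--         x, y = q.popleft()
--         visited[x][y] = 1
--         for k in range(4):
--             nx = x + dx[k]
--             ny = y + dy[k]
--             if 0 <= nx < n and 0 <= ny < m and land[nx][ny] and not visited[nx][ny]: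
--                 area += 1
--                 q.append((nx, ny))
--                 visited[nx][ny] = 1
--                 arr.add(ny)
--     return [area, arr]
--
-- def solution(land):
--     n = len(land)
--     m = len(land[0])
--     answer = [0] * m
--     visited = [[0] * m for _ in range(n)]
--     for i in range(m):
--         for j in range(n):
--             if not visited[j][i] and land[j][i]:
--                 area, arr = bfs(j, i, land, visited, n, m)
--                 for k in arr:
--                     answer[k] += area
--     return max(answer)
-- ===== SOURCE B (Python) =====
-- def solution(land):
--     n, m = len(land), len(land[0])
--     best = 0
--     for c in range(m):
--         cur = {(i, c) for i in range(n) if land[i][c]}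
--         frontier = cur
--         while frontier:
--             new = set()
--             for (i, j) in frontier:
--                 for (x, y) in ((i + 1, j), (i - 1, j), (i, j + 1), (i, j - 1)):
--                     if 0 <= x < n and 0 <= y < m and land[x][y] and (x, y) not in cur:
--                         new.add((x, y))
--             cur |= new
--             frontier = new
--         best = max(best, len(cur))
--     return best
-- ===== Notes on version B (the rewrite author's own statement) =====
-- stated objective: alternative
-- what changed: Replaces per-component BFS (deque + shared mutable visited grid + incremental per-column accumulation + final max over an answer array) by an independent per-column multi-source frontier saturation over sets: for each column, grow the set of cells reachable from that column's oil cells and take the max of the set sizes.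
-- outside the precondition, e.g. on solution([]): A raises IndexError, B raises IndexError; on solution([[]]): A raises ValueError, B returns 0; on solution([[1, 1], [1]]): A raises IndexError, B raises IndexError
import Mathlib
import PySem

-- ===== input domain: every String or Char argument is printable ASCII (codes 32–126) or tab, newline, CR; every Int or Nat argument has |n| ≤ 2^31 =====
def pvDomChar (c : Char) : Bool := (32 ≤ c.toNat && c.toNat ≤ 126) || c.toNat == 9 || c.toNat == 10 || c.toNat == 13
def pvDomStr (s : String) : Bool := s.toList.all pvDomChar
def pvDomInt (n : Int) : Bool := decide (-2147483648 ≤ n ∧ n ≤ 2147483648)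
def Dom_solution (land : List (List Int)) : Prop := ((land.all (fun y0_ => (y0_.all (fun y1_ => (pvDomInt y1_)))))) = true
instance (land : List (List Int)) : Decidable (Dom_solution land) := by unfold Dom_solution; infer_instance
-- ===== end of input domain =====

-- B replaces A's per-component BFS (queue + shared visited grid + incremental per-column accumulation)
-- by an independent per-column multi-source frontier saturation over sets; objective: alternative
-- (equivalence is about the return value only; A marks its `visited` scratch grid, which is local to A).

-- ===== PORT A =====

-- visited[i][j] = 1  (Python: v[i][j] = 1)
def pvSet2 (v : List (List Int)) (i j : Nat) : List (List Int) :=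
  v.set i ((v.getD i []).set j 1)

-- zip of dx = [1,-1,0,0] and dy = [0,0,1,-1] from bfs
def pvDxy : List (Int × Int) := [(1, 0), (-1, 0), (0, 1), (0, -1)]

-- one iteration of the `for k in range(4)` body of bfs, threading (area, q-tail, visited, arr)
def pvBfsStep (land : List (List Int)) (n m x y : Int)
    (st : Int × List (Int × Int) × List (List Int) × PySem.Set Int) (d : Int × Int) :
    Int × List (Int × Int) × List (List Int) × PySem.Set Int :=
  match st with
  | (area, q, vis, arr) =>
    let nx := x + d.1
    let ny := y + d.2
    if 0 ≤ nx ∧ nx < n ∧ 0 ≤ ny ∧ ny < m ∧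
        (land.getD nx.toNat []).getD ny.toNat 0 ≠ 0 ∧
        (vis.getD nx.toNat []).getD ny.toNat 0 = 0 then
      (area + 1, q ++ [(nx, ny)], pvSet2 vis nx.toNat ny.toNat, PySem.Set.add arr ny)
    else (area, q, vis, arr)

-- the `for k in range(4)` loop over the zipped offsets
def pvBfsBody (land : List (List Int)) (n m : Int) (x y : Int)
    (st : Int × List (Int × Int) × List (List Int) × PySem.Set Int) :
    Int × List (Int × Int) × List (List Int) × PySem.Set Int :=
  pvDxy.foldl (pvBfsStep land n m x y) st

-- the `while q` loop of bfs (fuel makes the recursion total; n*m+1 is proved sufficient below)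
def pvBfsLoop (land : List (List Int)) (n m : Int) :
    Nat → List (Int × Int) → List (List Int) → Int → PySem.Set Int →
    Int × PySem.Set Int × List (List Int)
  | 0, _, vis, area, arr => (area, arr, vis)
  | _ + 1, [], vis, area, arr => (area, arr, vis)
  | f + 1, (x, y) :: rest, vis, area, arr =>
      let vis1 := pvSet2 vis x.toNat y.toNat
      match pvBfsBody land n m x y (area, rest, vis1, arr) with
      | (area', q', vis', arr') => pvBfsLoop land n m f q' vis' area' arr'

-- Python bfs(j, i, land, visited, n, m); returns (area, arr) and the updated visited grid
def pvBfs (j i : Int) (land : List (List Int)) (visited : List (List Int)) (n m : Int) :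
    Int × PySem.Set Int × List (List Int) :=
  pvBfsLoop land n m ((n * m).toNat + 1) [(j, i)]
    (pvSet2 visited j.toNat i.toNat) 1 (PySem.Set.add PySem.Set.empty i)

-- `for k in arr: answer[k] += area` (additions at distinct indices: order-independent)
def pvAddArr (arr : PySem.Set Int) (area : Int) (answer : List Int) : List Int :=
  arr.foldl (fun a k => a.set k.toNat (a.getD k.toNat 0 + area)) answer

-- body of the inner `for j in range(n)` loop of solution
def pvInner (land : List (List Int)) (n m : Int) (i : Nat)
    (st : List Int × List (List Int)) (j : Nat) : List Int × List (List Int) :=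
  if ((st.2.getD j []).getD i 0 = 0) ∧ ((land.getD j []).getD i 0 ≠ 0) then
    match pvBfs (j : Int) (i : Int) land st.2 n m with
    | (area, arr, vis') => (pvAddArr arr area st.1, vis')
  else st

def solution (land : List (List Int)) : Int :=
  let n : Int := land.length
  let m : Int := (land.getD 0 []).length
  let answer : List Int := List.replicate m.toNat 0
  let visited : List (List Int) := List.replicate n.toNat (List.replicate m.toNat 0)
  let res := (List.range m.toNat).foldl (fun st i =>
    (List.range n.toNat).foldl (pvInner land n m i) st) (answer, visited)
  (PySem.List.max? res.1 (fun v => v)).getD 0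

-- ===== PORT B =====

def pvNbrs (p : Int × Int) : List (Int × Int) :=
  [(p.1 + 1, p.2), (p.1 - 1, p.2), (p.1, p.2 + 1), (p.1, p.2 - 1)]

-- one round: collect unseen in-bounds oil neighbours of the frontier
def pvExpand (land : List (List Int)) (n m : Int)
    (cur frontier : PySem.Set (Int × Int)) : PySem.Set (Int × Int) :=
  frontier.foldl (fun new p =>
    (pvNbrs p).foldl (fun new q =>
      if 0 ≤ q.1 ∧ q.1 < n ∧ 0 ≤ q.2 ∧ q.2 < m ∧
          (land.getD q.1.toNat []).getD q.2.toNat 0 ≠ 0 ∧ ¬ PySem.Set.contains cur q = true then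
        PySem.Set.add new q
      else new) new) PySem.Set.empty

-- the `while frontier` loop (fuel makes it total; n*m+1 is proved sufficient below)
def pvSat (land : List (List Int)) (n m : Int) :
    Nat → PySem.Set (Int × Int) → PySem.Set (Int × Int) → PySem.Set (Int × Int)
  | 0, cur, _ => cur
  | f + 1, cur, frontier =>
      if frontier = [] then cur
      else
        let new := pvExpand land n m cur frontier
        pvSat land n m f (PySem.Set.union cur new) new

def solution_alt (land : List (List Int)) : Int :=
  let n : Int := land.length
  let m : Int := (land.getD 0 []).length
  (List.range m.toNat).foldl (fun best c =>
    let seed : PySem.Set (Int × Int) :=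
      PySem.Set.ofList ((List.range n.toNat).filterMap (fun i =>
        if (land.getD i []).getD c 0 ≠ 0 then some ((i : Int), (c : Int)) else none))
    let cur := pvSat land n m (n.toNat * m.toNat + 1) seed seed
    max best (cur.length : Int)) 0

-- ===== PRECONDITION & SPEC =====
-- Pre_ excludes exactly the inputs where Python A raises: land = [] or land[0] = [] (IndexError on
-- land[0] / ValueError on max([])), and ragged grids with a row shorter than land[0] (IndexError in bfs).
def Pre_solution (land : List (List Int)) : Prop :=
  land ≠ [] ∧ 0 < (land.getD 0 []).length ∧
    ∀ row ∈ land, (land.getD 0 []).length ≤ row.length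

instance (land : List (List Int)) : Decidable (Pre_solution land) := by
  unfold Pre_solution; infer_instance

def pvWitness_solution : List (List Int) := [[1, 0, 1], [1, 1, 0]]

def Spec_solution (land : List (List Int)) (out : Int) : Prop := out = solution_alt land
instance (land : List (List Int)) (out : Int) : Decidable (Spec_solution land out) := by
  unfold Spec_solution; infer_instance

-- ===== CLAIM (what is proved, stated in full; the proofs are below) =====
def Claim_equal_solution : Prop :=
  ∀ (land : List (List Int)), Dom_solution land → Pre_solution land →
    Spec_solution land (solution land)

-- ===== LEMMAS AND PROOFS =====

-- ghost notions used only by the proofs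
def gOil (land : List (List Int)) (p : Int × Int) : Prop :=
  0 ≤ p.1 ∧ p.1 < (land.length : Int) ∧ 0 ≤ p.2 ∧ p.2 < ((land.getD 0 []).length : Int) ∧
    (land.getD p.1.toNat []).getD p.2.toNat 0 ≠ 0

def gNear (land : List (List Int)) (p q : Int × Int) : Prop :=
  gOil land p ∧ gOil land q ∧
    ((p.1 = q.1 ∧ (p.2 + 1 = q.2 ∨ q.2 + 1 = p.2)) ∨
     (p.2 = q.2 ∧ (p.1 + 1 = q.1 ∨ q.1 + 1 = p.1)))

def gReach (land : List (List Int)) : Int × Int → Int × Int → Prop :=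
  Relation.ReflTransGen (gNear land)

-- the set of cells connected to column c
def gCol (land : List (List Int)) (c : Nat) : Set (Int × Int) :=
  {p | ∃ s, gOil land s ∧ s.2 = (c : Int) ∧ gReach land s p}

noncomputable def gCount (land : List (List Int)) (c : Nat) : ℕ := (gCol land c).ncard


-- generic list helper
theorem pvGetD_set {α : Type} (l : List α) (i k : Nat) (x d : α) :
    (l.set i x).getD k d = if k = i ∧ i < l.length then x else l.getD k d := by
  simp [List.getD, List.getElem?_set]
  split_ifs with h1 h2 h3 <;> simp_all

-- visited-grid membership (nonnegative coordinates whose entry is set)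
def Vv (v : List (List Int)) (p : Int × Int) : Prop :=
  0 ≤ p.1 ∧ 0 ≤ p.2 ∧ (v.getD p.1.toNat []).getD p.2.toNat 0 ≠ 0

def Shape (land v : List (List Int)) : Prop :=
  v.length = land.length ∧ ∀ r ∈ v, r.length = (land.getD 0 []).length

theorem vv_bound {land v : List (List Int)} {p : Int × Int} (hsh : Shape land v)
    (h : Vv v p) : p.1 < (land.length : Int) ∧ p.2 < ((land.getD 0 []).length : Int) := by
  obtain ⟨h1, h2, h3⟩ := h
  have hN := hsh.1
  by_cases hi : p.1.toNat < v.length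
  · have hrow : v.getD p.1.toNat [] ∈ v := by
      rw [List.getD_eq_getElem?_getD, List.getElem?_eq_getElem hi]
      exact List.getElem_mem _
    have hlen := hsh.2 _ hrow
    by_cases hj : p.2.toNat < (v.getD p.1.toNat []).length
    · rw [hlen] at hj
      omega
    · exfalso; apply h3
      exact List.getD_eq_default _ _ (by omega)
  · exfalso; apply h3
    rw [List.getD_eq_default v _ (by omega)]
    rfl

theorem shape_set2 {land v : List (List Int)} (hsh : Shape land v) (i j : Nat) :
    Shape land (pvSet2 v i j) := by
  unfold pvSet2
  by_cases hi : i < v.length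
  · refine ⟨by simp [hsh.1], ?_⟩
    intro r hr
    rcases List.mem_or_eq_of_mem_set hr with h | h
    · exact hsh.2 _ h
    · subst h
      simp only [List.length_set]
      apply hsh.2
      rw [List.getD_eq_getElem?_getD, List.getElem?_eq_getElem hi]
      exact List.getElem_mem _
  · rw [List.set_eq_of_length_le (by omega)]
    exact hsh

theorem vv_set2 {land v : List (List Int)} (hsh : Shape land v) {a b : Int}
    (ha0 : 0 ≤ a) (ha : a < (land.length : Int)) (hb0 : 0 ≤ b)
    (hb : b < ((land.getD 0 []).length : Int)) (p : Int × Int) :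
    Vv (pvSet2 v a.toNat b.toNat) p ↔ p = (a, b) ∨ Vv v p := by
  have hlenv : v.length = land.length := hsh.1
  have hrowmem : v.getD a.toNat [] ∈ v := by
    rw [List.getD_eq_getElem?_getD, List.getElem?_eq_getElem (by omega)]
    exact List.getElem_mem _
  have hrowlen : (v.getD a.toNat []).length = (land.getD 0 []).length := hsh.2 _ hrowmem
  constructor
  · rintro ⟨h1, h2, h3⟩
    rw [pvSet2, pvGetD_set] at h3
    split_ifs at h3 with hc
    · rw [pvGetD_set] at h3
      split_ifs at h3 with hc2
      · left
        have : p.1 = a ∧ p.2 = b := by omega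
        exact Prod.ext this.1 this.2
      · right
        refine ⟨h1, h2, ?_⟩
        have : v.getD p.1.toNat [] = v.getD a.toNat [] := by rw [(by omega : p.1.toNat = a.toNat)]
        rw [this]
        exact h3
    · exact Or.inr ⟨h1, h2, h3⟩
  · rintro (h | h)
    · subst h
      refine ⟨ha0, hb0, ?_⟩
      rw [pvSet2, pvGetD_set, if_pos ⟨rfl, by omega⟩, pvGetD_set, if_pos ⟨rfl, by omega⟩]
      exact one_ne_zero
    · obtain ⟨h1, h2, h3⟩ := h
      refine ⟨h1, h2, ?_⟩
      rw [pvSet2, pvGetD_set]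
      split_ifs with hc
      · rw [pvGetD_set]
        split_ifs with hc2
        · exact one_ne_zero
        · have : v.getD p.1.toNat [] = v.getD a.toNat [] := by rw [(by omega : p.1.toNat = a.toNat)]
          rw [← this]
          exact h3
      · exact h3

-- graph facts
theorem gOil_bounds {land : List (List Int)} {p : Int × Int} (h : gOil land p) :
    0 ≤ p.1 ∧ p.1 < (land.length : Int) ∧ 0 ≤ p.2 ∧ p.2 < ((land.getD 0 []).length : Int) :=
  ⟨h.1, h.2.1, h.2.2.1, h.2.2.2.1⟩

theorem gNear_symm {land : List (List Int)} {p q : Int × Int} (h : gNear land p q) :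
    gNear land q p := by
  obtain ⟨h1, h2, h3⟩ := h
  exact ⟨h2, h1, by tauto⟩

theorem gReach_symm {land : List (List Int)} {p q : Int × Int} (h : gReach land p q) :
    gReach land q p := by
  induction h with
  | refl => exact Relation.ReflTransGen.refl
  | tail _ hn ih => exact Relation.ReflTransGen.trans (Relation.ReflTransGen.single (gNear_symm hn)) ih

theorem gReach_oil {land : List (List Int)} {p q : Int × Int} (hp : gOil land p)
    (h : gReach land p q) : gOil land q := by
  induction h with
  | refl => exact hp
  | tail _ hn _ => exact hn.2.1

theorem near_offsets {land : List (List Int)} {p r : Int × Int} (h : gNear land p r) :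
    ∃ d ∈ pvDxy, r = (p.1 + d.1, p.2 + d.2) := by
  obtain ⟨_, _, h3⟩ := h
  rcases h3 with ⟨h1, h2 | h2⟩ | ⟨h1, h2 | h2⟩
  · exact ⟨(0, 1), by simp [pvDxy], Prod.ext (by omega) (by omega)⟩
  · exact ⟨(0, -1), by simp [pvDxy], Prod.ext (by omega) (by omega)⟩
  · exact ⟨(1, 0), by simp [pvDxy], Prod.ext (by omega) (by omega)⟩
  · exact ⟨(-1, 0), by simp [pvDxy], Prod.ext (by omega) (by omega)⟩

theorem offsets_near {land : List (List Int)} {p : Int × Int} {d : Int × Int}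
    (hd : d ∈ pvDxy) (hp : gOil land p) (hr : gOil land (p.1 + d.1, p.2 + d.2)) :
    gNear land p (p.1 + d.1, p.2 + d.2) := by
  refine ⟨hp, hr, ?_⟩
  fin_cases hd
  · exact Or.inr ⟨by ring, Or.inl (by ring)⟩
  · exact Or.inr ⟨by ring, Or.inr (by ring)⟩
  · exact Or.inl ⟨by ring, Or.inl (by ring)⟩
  · exact Or.inl ⟨by ring, Or.inr (by ring)⟩

-- finiteness: everything lives inside the bounded cell rectangle
noncomputable def cellsF (land : List (List Int)) : Finset (Int × Int) :=
  Finset.Icc 0 ((land.length : Int) - 1) ×ˢ Finset.Icc 0 (((land.getD 0 []).length : Int) - 1)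

theorem mem_cellsF {land : List (List Int)} {p : Int × Int} :
    p ∈ cellsF land ↔ 0 ≤ p.1 ∧ p.1 < (land.length : Int) ∧ 0 ≤ p.2 ∧
      p.2 < ((land.getD 0 []).length : Int) := by
  simp [cellsF, Finset.mem_Icc]
  omega

theorem card_cellsF (land : List (List Int)) :
    (cellsF land).card = land.length * (land.getD 0 []).length := by
  rw [cellsF, Finset.card_product, Int.card_Icc, Int.card_Icc]
  simp

theorem ncard_le_cells {land : List (List Int)} {S : Set (Int × Int)}
    (h : S ⊆ ↑(cellsF land)) : S.ncard ≤ land.length * (land.getD 0 []).length := by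
  rw [← card_cellsF land, ← Set.ncard_coe_finset (cellsF land)]
  exact Set.ncard_le_ncard h (cellsF land).finite_toSet

theorem finite_of_cells {land : List (List Int)} {S : Set (Int × Int)}
    (h : S ⊆ ↑(cellsF land)) : S.Finite :=
  Set.Finite.subset (cellsF land).finite_toSet h

theorem vv_subset_cells {land v : List (List Int)} (hsh : Shape land v) :
    {p | Vv v p} ⊆ ↑(cellsF land) := by
  intro p hp
  have := vv_bound hsh hp
  rw [Finset.mem_coe, mem_cellsF]
  exact ⟨hp.1, this.1, hp.2.1, this.2⟩



-- ghost set of newly marked cells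
def Mk (v0 v : List (List Int)) : Set (Int × Int) := {p | Vv v p ∧ ¬ Vv v0 p}

theorem mk_congr {v0 v1 v : List (List Int)} (h : ∀ p, Vv v1 p ↔ Vv v p) :
    Mk v0 v1 = Mk v0 v := Set.ext fun p => by simp [Mk, h p]

-- invariant of the bfs while-loop
def BfsInv (land v0 : List (List Int)) (s : Int × Int) (q : List (Int × Int))
    (v : List (List Int)) (area : Int) (arr : PySem.Set Int) (fuel : Nat) : Prop :=
  Shape land v ∧
  (∀ p, Vv v0 p → Vv v p) ∧
  (∀ p, Vv v p → gOil land p) ∧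
  (∀ p, Vv v p → Vv v0 p ∨ gReach land s p) ∧
  (Vv v s ∧ ¬ Vv v0 s) ∧
  (∀ p ∈ q, Vv v p ∧ ¬ Vv v0 p) ∧
  (∀ p, Vv v p → ¬ Vv v0 p → p ∉ q → ∀ r, gNear land p r → Vv v r) ∧
  area = ((Mk v0 v).ncard : Int) ∧
  (∀ k, k ∈ arr ↔ ∃ p, p ∈ Mk v0 v ∧ p.2 = k) ∧
  List.Nodup arr ∧
  q.length + land.length * (land.getD 0 []).length ≤ fuel + (Mk v0 v).ncard

-- invariant while folding pvBfsStep over the neighbour offsets of the popped cell (x, y);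
-- ds are the offsets already processed
def BodyInv (land v0 : List (List Int)) (s : Int × Int) (x y : Int) (f : Nat)
    (ds : List (Int × Int))
    (st : Int × List (Int × Int) × List (List Int) × PySem.Set Int) : Prop :=
  Shape land st.2.2.1 ∧
  (∀ p, Vv v0 p → Vv st.2.2.1 p) ∧
  (∀ p, Vv st.2.2.1 p → gOil land p) ∧
  (∀ p, Vv st.2.2.1 p → Vv v0 p ∨ gReach land s p) ∧
  (Vv st.2.2.1 s ∧ ¬ Vv v0 s) ∧
  (∀ p ∈ st.2.1, Vv st.2.2.1 p ∧ ¬ Vv v0 p) ∧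
  (∀ p, Vv st.2.2.1 p → ¬ Vv v0 p → p ∉ st.2.1 → p ≠ (x, y) →
    ∀ r, gNear land p r → Vv st.2.2.1 r) ∧
  (∀ d ∈ ds, gOil land (x + d.1, y + d.2) → Vv st.2.2.1 (x + d.1, y + d.2)) ∧
  st.1 = ((Mk v0 st.2.2.1).ncard : Int) ∧
  (∀ k, k ∈ st.2.2.2 ↔ ∃ p, p ∈ Mk v0 st.2.2.1 ∧ p.2 = k) ∧
  List.Nodup st.2.2.2 ∧
  st.2.1.length + land.length * (land.getD 0 []).length ≤ f + (Mk v0 st.2.2.1).ncard ∧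
  (Vv st.2.2.1 (x, y) ∧ ¬ Vv v0 (x, y))

theorem bodyStep {land v0 : List (List Int)} {s : Int × Int} {x y : Int} {f : Nat}
    {ds : List (Int × Int)} {st : Int × List (Int × Int) × List (List Int) × PySem.Set Int}
    {d : Int × Int} (hd : d ∈ pvDxy)
    (h : BodyInv land v0 s x y f ds st) :
    BodyInv land v0 s x y f (ds ++ [d])
      (pvBfsStep land (land.length : Int) ((land.getD 0 []).length : Int) x y st d) := by
  obtain ⟨area, q, v, arr⟩ := st
  obtain ⟨hsh, hmono, hoil, hrch, hs, hq, hfr, hds, har, hak, hnd, hfu, hxy⟩ := h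
  simp only at hsh hmono hoil hrch hs hq hfr hds har hak hnd hfu hxy
  by_cases hc : 0 ≤ x + d.1 ∧ x + d.1 < (land.length : Int) ∧ 0 ≤ y + d.2 ∧
      y + d.2 < ((land.getD 0 []).length : Int) ∧
      (land.getD (x + d.1).toNat []).getD (y + d.2).toNat 0 ≠ 0 ∧
      (v.getD (x + d.1).toNat []).getD (y + d.2).toNat 0 = 0
  · -- the neighbour is a fresh in-bounds oil cell: mark and enqueue it
    rw [pvBfsStep, if_pos hc]
    obtain ⟨hc1, hc2, hc3, hc4, hc5, hc6⟩ := hc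
    set r : Int × Int := (x + d.1, y + d.2) with hr
    have hroil : gOil land r := ⟨hc1, hc2, hc3, hc4, hc5⟩
    have hrnv : ¬ Vv v r := fun hv => hv.2.2 hc6
    have hrnv0 : ¬ Vv v0 r := fun hv => hrnv (hmono _ hv)
    have hvv := vv_set2 hsh hc1 hc2 hc3 hc4
    have hmk : Mk v0 (pvSet2 v (x + d.1).toNat (y + d.2).toNat) = insert r (Mk v0 v) := by
      ext p
      simp only [Mk, Set.mem_setOf_eq, Set.mem_insert_iff, hvv p]
      constructor
      · rintro ⟨hv | hv, h0⟩
        · exact Or.inl hv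
        · exact Or.inr ⟨hv, h0⟩
      · rintro (hv | ⟨hv, h0⟩)
        · exact ⟨Or.inl hv, hv ▸ hrnv0⟩
        · exact ⟨Or.inr hv, h0⟩
    have hrnmk : r ∉ Mk v0 v := fun hm => hrnv hm.1
    have hfin : (Mk v0 v).Finite :=
      finite_of_cells (fun p hp => vv_subset_cells hsh hp.1)
    have hncard : (Mk v0 (pvSet2 v (x + d.1).toNat (y + d.2).toNat)).ncard
        = (Mk v0 v).ncard + 1 := by
      rw [hmk]; exact Set.ncard_insert_of_notMem hrnmk hfin
    have hrx : Vv v (x, y) := hxy.1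
    have hrs : gReach land s r := by
      rcases hrch _ hrx with hv0 | hrs
      · exact absurd hv0 hxy.2
      · exact hrs.tail (offsets_near hd (hoil _ hrx) hroil)
    refine ⟨shape_set2 hsh _ _, ?_, ?_, ?_, ?_, ?_, ?_, ?_, ?_, ?_, ?_, ?_, ?_⟩
    · intro p hp; exact (hvv p).2 (Or.inr (hmono _ hp))
    · intro p hp
      rcases (hvv p).1 hp with hp | hp
      · exact hp ▸ hroil
      · exact hoil _ hp
    · intro p hp
      rcases (hvv p).1 hp with hp | hp
      · exact Or.inr (hp ▸ hrs)
      · exact hrch _ hp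
    · exact ⟨(hvv s).2 (Or.inr hs.1), hs.2⟩
    · intro p hp
      simp only [List.mem_append, List.mem_singleton] at hp
      rcases hp with hp | hp
      · have := hq _ hp
        exact ⟨(hvv p).2 (Or.inr this.1), this.2⟩
      · subst hp
        exact ⟨(hvv r).2 (Or.inl rfl), hrnv0⟩
    · intro p hp hp0 hpq hpxy r' hnr'
      have hpq' : p ∉ q := fun hm => hpq (List.mem_append_left _ hm)
      have hpr : p ≠ r := fun he => hpq (by simp [he])
      rcases (hvv p).1 hp with hp' | hp'
      · exact absurd hp' hpr
      · exact (hvv r').2 (Or.inr (hfr p hp' hp0 hpq' hpxy r' hnr'))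
    · intro d' hd'
      simp only [List.mem_append, List.mem_singleton] at hd'
      rcases hd' with hd' | hd'
      · intro ho; exact (hvv _).2 (Or.inr (hds d' hd' ho))
      · intro _
        subst hd'
        exact (hvv r).2 (Or.inl rfl)
    · simp only [har, hncard]; push_cast; ring
    · intro k
      simp only [PySem.Set.mem_add, hak, hmk, Set.mem_insert_iff]
      constructor
      · rintro (⟨p, hp, hpk⟩ | hk)
        · exact ⟨p, Or.inr hp, hpk⟩
        · exact ⟨r, Or.inl rfl, hk.symm⟩
      · rintro ⟨p, hp | hp, hpk⟩
        · exact Or.inr (by rw [← hpk, hp])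
        · exact Or.inl ⟨p, hp, hpk⟩
    · exact PySem.Set.nodup_add _ _ hnd
    · simp only [List.length_append, List.length_singleton, hncard]
      omega
    · exact ⟨(hvv _).2 (Or.inr hxy.1), hxy.2⟩
  · -- nothing to do; record that this offset's cell is not a fresh oil cell
    rw [pvBfsStep, if_neg hc]
    refine ⟨hsh, hmono, hoil, hrch, hs, hq, hfr, ?_, har, hak, hnd, hfu, hxy⟩
    intro d' hd'
    simp only [List.mem_append, List.mem_singleton] at hd'
    rcases hd' with hd' | hd'
    · exact hds d' hd'
    · intro ho
      subst hd'
      obtain ⟨h1, h2, h3, h4, h5⟩ := ho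
      by_contra hnv
      exact hc ⟨h1, h2, h3, h4, h5, by_contra fun hne => hnv ⟨h1, h3, hne⟩⟩

theorem bodyFold {land v0 : List (List Int)} {s : Int × Int} {x y : Int} {f : Nat} :
    ∀ (ds2 : List (Int × Int)) (st : Int × List (Int × Int) × List (List Int) × PySem.Set Int)
      (ds1 : List (Int × Int)), (∀ d ∈ ds2, d ∈ pvDxy) →
      BodyInv land v0 s x y f ds1 st →
      BodyInv land v0 s x y f (ds1 ++ ds2)
        (ds2.foldl (pvBfsStep land (land.length : Int) ((land.getD 0 []).length : Int) x y) st)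
  | [], st, ds1, _, h => by simpa using h
  | d :: ds2, st, ds1, hmem, h => by
    have h1 := bodyStep (hmem d (by simp)) h
    have h2 := bodyFold ds2 _ (ds1 ++ [d]) (fun d' hd' => hmem d' (by simp [hd'])) h1
    simpa using h2

-- conclusion of one full bfs call
def BfsPost (land v0 : List (List Int)) (s : Int × Int)
    (res : Int × PySem.Set Int × List (List Int)) : Prop :=
  Shape land res.2.2 ∧
  (∀ p, Vv res.2.2 p ↔ Vv v0 p ∨ gReach land s p) ∧
  res.1 = (({p | gReach land s p}).ncard : Int) ∧
  (∀ k, k ∈ res.2.1 ↔ ∃ p, gReach land s p ∧ p.2 = k) ∧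
  List.Nodup res.2.1

theorem bfsExit {land v0 : List (List Int)} {s : Int × Int} {v : List (List Int)}
    {area : Int} {arr : PySem.Set Int} {fuel : Nat}
    (hcl0 : ∀ p r, Vv v0 p → gNear land p r → Vv v0 r)
    (h : BfsInv land v0 s [] v area arr fuel) :
    BfsPost land v0 s (area, arr, v) := by
  obtain ⟨hsh, hmono, hoil, hrch, hs, _, hfr, har, hak, hnd, _⟩ := h
  have hmk : Mk v0 v = {p | gReach land s p} := by
    ext p
    simp only [Mk, Set.mem_setOf_eq]
    constructor
    · rintro ⟨hv, h0⟩
      rcases hrch _ hv with h | h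
      · exact absurd h h0
      · exact h
    · intro hr
      induction hr with
      | refl => exact ⟨hs.1, hs.2⟩
      | tail hr hn ih =>
        have h1 := hfr _ ih.1 ih.2 (List.not_mem_nil) _ hn
        exact ⟨h1, fun h0 => ih.2 (hcl0 _ _ h0 (gNear_symm hn))⟩
  refine ⟨hsh, ?_, ?_, ?_, hnd⟩
  · intro p
    constructor
    · intro hv
      rcases hrch _ hv with h | h
      · exact Or.inl h
      · exact Or.inr h
    · rintro (h | h)
      · exact hmono _ h
      · by_cases h0 : Vv v0 p
        · exact hmono _ h0
        · have : p ∈ Mk v0 v := by rw [hmk]; exact h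
          exact this.1
  · rw [har, hmk]
  · intro k
    rw [hak]
    constructor
    · rintro ⟨p, hp, hpk⟩
      rw [hmk] at hp
      exact ⟨p, hp, hpk⟩
    · rintro ⟨p, hp, hpk⟩
      exact ⟨p, by rw [hmk]; exact hp, hpk⟩

theorem bfsLoop_spec {land v0 : List (List Int)} {s : Int × Int}
    (hcl0 : ∀ p r, Vv v0 p → gNear land p r → Vv v0 r) :
    ∀ (fuel : Nat) (q : List (Int × Int)) (v : List (List Int)) (area : Int)
      (arr : PySem.Set Int), BfsInv land v0 s q v area arr fuel →
      BfsPost land v0 s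
        (pvBfsLoop land (land.length : Int) ((land.getD 0 []).length : Int) fuel q v area arr)
  | 0, q, v, area, arr, h => by
    have hq : q = [] := by
      have hfu := h.2.2.2.2.2.2.2.2.2.2
      have hsub : Mk v0 v ⊆ ↑(cellsF land) := fun p hp => vv_subset_cells h.1 hp.1
      have := ncard_le_cells hsub
      have : q.length = 0 := by omega
      exact List.length_eq_zero_iff.mp this
    subst hq
    exact bfsExit hcl0 h
  | _ + 1, [], v, area, arr, h => bfsExit hcl0 h
  | f + 1, (x, y) :: rest, v, area, arr, h => by
    obtain ⟨hsh, hmono, hoil, hrch, hs, hq, hfr, har, hak, hnd, hfu⟩ := h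
    have hxy := hq (x, y) (by simp)
    have hb := vv_bound hsh hxy.1
    have hvv' : ∀ p, Vv (pvSet2 v x.toNat y.toNat) p ↔ Vv v p := by
      intro p
      rw [vv_set2 hsh hxy.1.1 hb.1 hxy.1.2.1 hb.2 p]
      constructor
      · rintro (h | h)
        · exact h ▸ hxy.1
        · exact h
      · exact Or.inr
    have hmk := mk_congr (v0 := v0) hvv'
    have hentry : BodyInv land v0 s x y f []
        (area, rest, pvSet2 v x.toNat y.toNat, arr) := by
      refine ⟨shape_set2 hsh _ _, ?_, ?_, ?_, ?_, ?_, ?_, by simp, ?_, ?_, hnd, ?_, ?_⟩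
      · intro p hp; exact (hvv' p).2 (hmono _ hp)
      · intro p hp; exact hoil _ ((hvv' p).1 hp)
      · intro p hp; exact hrch _ ((hvv' p).1 hp)
      · exact ⟨(hvv' s).2 hs.1, hs.2⟩
      · intro p hp
        have := hq p (by simp [hp])
        exact ⟨(hvv' p).2 this.1, this.2⟩
      · intro p hp hp0 hpq hpxy r hnr
        have : p ∉ (x, y) :: rest := by
          simp only [List.mem_cons, not_or]
          exact ⟨hpxy, hpq⟩
        exact (hvv' r).2 (hfr p ((hvv' p).1 hp) hp0 this r hnr)
      · simp only [hmk]; exact har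
      · intro k; simp only [hmk]; exact hak k
      · simp only [hmk]
        simp only [List.length_cons] at hfu
        omega
      · exact ⟨(hvv' _).2 hxy.1, hxy.2⟩
    have hbody := bodyFold pvDxy _ [] (fun d hd => hd) hentry
    simp only [List.nil_append] at hbody
    rcases hE : pvBfsBody land (land.length : Int) ((land.getD 0 []).length : Int) x y
      (area, rest, pvSet2 v x.toNat y.toNat, arr) with ⟨a2, q2, v2, r2⟩
    have hbody' : BodyInv land v0 s x y f pvDxy (a2, q2, v2, r2) := by
      rw [← hE]
      exact hbody
    obtain ⟨hsh', hmono', hoil', hrch', hs', hq', hfr', hds', har', hak', hnd', hfu', hxy'⟩ :=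
      hbody'
    simp only at hsh' hmono' hoil' hrch' hs' hq' hfr' hds' har' hak' hnd' hfu' hxy'
    have hstep : BfsInv land v0 s q2 v2 a2 r2 f := by
      refine ⟨hsh', hmono', hoil', hrch', hs', hq', ?_, har', hak', hnd', hfu'⟩
      intro p hp hp0 hpq r hnr
      by_cases hpxy : p = (x, y)
      · subst hpxy
        obtain ⟨d, hd, hrd⟩ := near_offsets hnr
        rw [hrd]
        exact hds' d hd (hrd ▸ hnr.2.1)
      · exact hfr' p hp hp0 hpq hpxy r hnr
    rw [pvBfsLoop, hE]
    exact bfsLoop_spec hcl0 f q2 v2 a2 r2 hstep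

theorem pvBfs_spec {land v0 : List (List Int)} {j i : Int}
    (hcl0 : ∀ p r, Vv v0 p → gNear land p r → Vv v0 r)
    (hsh : Shape land v0)
    (hoil0 : ∀ p, Vv v0 p → gOil land p)
    (hs : gOil land (j, i)) (hnv : ¬ Vv v0 (j, i)) :
    BfsPost land v0 (j, i)
      (pvBfs j i land v0 (land.length : Int) ((land.getD 0 []).length : Int)) := by
  have hb := gOil_bounds hs
  have hvv := vv_set2 (v := v0) hsh hb.1 hb.2.1 hb.2.2.1 hb.2.2.2
  have hmk : Mk v0 (pvSet2 v0 j.toNat i.toNat) = {((j : Int), (i : Int))} := by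
    ext p
    simp only [Mk, Set.mem_setOf_eq, Set.mem_singleton_iff, hvv p]
    constructor
    · rintro ⟨h | h, h0⟩
      · exact h
      · exact absurd h h0
    · rintro h
      exact ⟨Or.inl h, h ▸ hnv⟩
  have hinv : BfsInv land v0 (j, i) [(j, i)] (pvSet2 v0 j.toNat i.toNat) 1
      (PySem.Set.add PySem.Set.empty i)
      (((land.length : Int) * ((land.getD 0 []).length : Int)).toNat + 1) := by
    refine ⟨shape_set2 hsh _ _, ?_, ?_, ?_, ?_, ?_, ?_, ?_, ?_, ?_, ?_⟩
    · intro p hp; exact (hvv p).2 (Or.inr hp)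
    · intro p hp
      rcases (hvv p).1 hp with h | h
      · exact h ▸ hs
      · exact hoil0 _ h
    · intro p hp
      rcases (hvv p).1 hp with h | h
      · exact Or.inr (h ▸ Relation.ReflTransGen.refl)
      · exact Or.inl h
    · exact ⟨(hvv _).2 (Or.inl rfl), hnv⟩
    · intro p hp
      simp only [List.mem_singleton] at hp
      subst hp
      exact ⟨(hvv _).2 (Or.inl rfl), hnv⟩
    · intro p hp hp0 hpq r hnr
      rcases (hvv p).1 hp with h | h
      · exact absurd (by simp [h]) hpq
      · exact absurd h hp0
    · rw [hmk, Set.ncard_singleton]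
      rfl
    · intro k
      simp only [PySem.Set.mem_add, hmk]
      constructor
      · rintro (h | h)
        · simp [PySem.Set.empty] at h
        · exact ⟨(j, i), rfl, h.symm⟩
      · rintro ⟨p, hp, hpk⟩
        simp only [Set.mem_singleton_iff] at hp
        subst hp
        exact Or.inr hpk.symm
    · exact PySem.Set.nodup_add _ _ List.nodup_nil
    · rw [hmk, Set.ncard_singleton]
      have : ((land.length : Int) * ((land.getD 0 []).length : Int)) =
          ((land.length * (land.getD 0 []).length : Nat) : Int) := by push_cast; ring
      simp only [List.length_singleton, this, Int.toNat_natCast]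
      omega
  exact bfsLoop_spec hcl0 _ _ _ _ _ hinv


theorem getD_replicate {α : Type} {n : ℕ} (a d : α) (i : ℕ) :
    (List.replicate n a).getD i d = if i < n then a else d := by
  rcases lt_or_ge i n with h | h
  · rw [List.getD_eq_getElem _ _ (by simpa), if_pos h]; simp
  · rw [List.getD_eq_default _ _ (by simpa), if_neg (by omega)]

theorem pvAddArr_spec (area : Int) :
    ∀ (arr : List Int) (answer : List Int), arr.Nodup →
      (∀ k ∈ arr, 0 ≤ k ∧ k < (answer.length : Int)) →
      (pvAddArr arr area answer).length = answer.length ∧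
      ∀ c : Nat, (pvAddArr arr area answer).getD c 0 =
        answer.getD c 0 + (if (c : Int) ∈ arr then area else 0)
  | [], answer, _, _ => by simp [pvAddArr]
  | k :: ks, answer, hnd, hin => by
    have hk := hin k (by simp)
    have hstep : pvAddArr (k :: ks) area answer =
        pvAddArr ks area (answer.set k.toNat (answer.getD k.toNat 0 + area)) := rfl
    have hlen : (answer.set k.toNat (answer.getD k.toNat 0 + area)).length = answer.length :=
      List.length_set ..
    have ih := pvAddArr_spec area ks (answer.set k.toNat (answer.getD k.toNat 0 + area))
      hnd.of_cons (fun k' hk' => by rw [hlen]; exact hin k' (by simp [hk']))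
    rw [hstep]
    refine ⟨ih.1.trans hlen, ?_⟩
    intro c
    rw [ih.2 c, pvGetD_set]
    by_cases hck : (c : Int) = k
    · have hc1 : c = k.toNat ∧ k.toNat < answer.length := by omega
      rw [if_pos hc1]
      have hks : (c : Int) ∉ ks := fun hm => (List.nodup_cons.mp hnd).1 (hck ▸ hm)
      rw [if_neg hks, if_pos (show ((c : Int)) ∈ k :: ks by simp [hck]), hc1.1]
      ring
    · have hc1 : ¬ (c = k.toNat ∧ k.toNat < answer.length) := by
        rintro ⟨h1, _⟩
        omega
      rw [if_neg hc1]
      have : (if (c : Int) ∈ k :: ks then area else 0) =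
          (if (c : Int) ∈ ks then area else 0) := by
        by_cases hm : (c : Int) ∈ ks
        · rw [if_pos (by simp [hm]), if_pos hm]
        · rw [if_neg (by simp [hck, hm]), if_neg hm]
      rw [this]

theorem reach_unvisited {land v : List (List Int)} {s p : Int × Int}
    (hcl : ∀ p r, Vv v p → gNear land p r → Vv v r) (hnv : ¬ Vv v s)
    (h : gReach land s p) : ¬ Vv v p := by
  induction h with
  | refl => exact hnv
  | tail _ hn ih => exact fun hr => ih (hcl _ _ hr (gNear_symm hn))

-- invariant of the double scan loop of solution
def OuterInv (land : List (List Int)) (st : List Int × List (List Int)) : Prop :=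
  Shape land st.2 ∧
  (∀ p r, Vv st.2 p → gNear land p r → Vv st.2 r) ∧
  (∀ p, Vv st.2 p → gOil land p) ∧
  st.1.length = (land.getD 0 []).length ∧
  (∀ c : Nat, c < (land.getD 0 []).length →
    st.1.getD c 0 = (({p | Vv st.2 p ∧ p ∈ gCol land c}).ncard : Int))

theorem cellStep {land : List (List Int)} {st : List Int × List (List Int)} {i j : Nat}
    (hinv : OuterInv land st) (hi : i < (land.getD 0 []).length) (hj : j < land.length) :
    OuterInv land (pvInner land (land.length : Int) ((land.getD 0 []).length : Int) i st j) ∧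
    (∀ p, Vv st.2 p →
      Vv (pvInner land (land.length : Int) ((land.getD 0 []).length : Int) i st j).2 p) ∧
    (gOil land ((j : Int), (i : Int)) →
      Vv (pvInner land (land.length : Int) ((land.getD 0 []).length : Int) i st j).2
        ((j : Int), (i : Int))) := by
  obtain ⟨hsh, hcl, hoil, hlen, hans⟩ := hinv
  by_cases hg : ((st.2.getD j []).getD i 0 = 0) ∧ ((land.getD j []).getD i 0 ≠ 0)
  · -- fresh oil cell: run bfs and accumulate
    have hs : gOil land ((j : Int), (i : Int)) := by
      refine ⟨by positivity, by show (j : Int) < (land.length : Int); exact_mod_cast hj,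
        by positivity, by show (i : Int) < ((land.getD 0 []).length : Int); exact_mod_cast hi, ?_⟩
      simpa using hg.2
    have hnv : ¬ Vv st.2 ((j : Int), (i : Int)) := by
      rintro ⟨_, _, hvv⟩
      simp only [Int.toNat_natCast] at hvv
      exact hvv hg.1
    have hpost := pvBfs_spec (v0 := st.2) (j := (j : Int)) (i := (i : Int))
      hcl hsh hoil hs hnv
    rw [pvInner, if_pos hg]
    rcases hB : pvBfs (j : Int) (i : Int) land st.2 (land.length : Int)
      ((land.getD 0 []).length : Int) with ⟨area, arr, vis'⟩
    rw [hB] at hpost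
    obtain ⟨hsh', hvv', harea, harr, hnd⟩ := hpost
    simp only at hsh' hvv' harea harr hnd
    have hdisj : ∀ p, gReach land ((j : Int), (i : Int)) p → ¬ Vv st.2 p :=
      fun p hp => reach_unvisited hcl hnv hp
    have harrin : ∀ k ∈ arr, 0 ≤ k ∧ k < (st.1.length : Int) := by
      intro k hk
      obtain ⟨p, hp, hpk⟩ := (harr k).1 hk
      have := gOil_bounds (gReach_oil hs hp)
      rw [hlen]
      omega
    have haa := pvAddArr_spec area arr st.1 hnd harrin
    refine ⟨⟨hsh', ?_, ?_, by rw [haa.1, hlen], ?_⟩, ?_, ?_⟩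
    · intro p r hp hnr
      rcases (hvv' p).1 hp with h | h
      · exact (hvv' r).2 (Or.inl (hcl _ _ h hnr))
      · exact (hvv' r).2 (Or.inr (h.tail hnr))
    · intro p hp
      rcases (hvv' p).1 hp with h | h
      · exact hoil _ h
      · exact gReach_oil hs h
    · intro c hc
      rw [haa.2 c, hans c hc]
      by_cases hmem : (c : Int) ∈ arr
      · obtain ⟨p0, hp0, hp0c⟩ := (harr _).1 hmem
        have hsub : {p | gReach land ((j : Int), (i : Int)) p} ⊆ gCol land c := by
          intro p hp
          exact ⟨p0, gReach_oil hs hp0, hp0c, (gReach_symm hp0).trans hp⟩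
        have hset : {p | Vv vis' p ∧ p ∈ gCol land c} =
            {p | Vv st.2 p ∧ p ∈ gCol land c} ∪ {p | gReach land ((j : Int), (i : Int)) p} := by
          ext p
          simp only [Set.mem_setOf_eq, Set.mem_union, hvv' p]
          constructor
          · rintro ⟨h | h, hcol⟩
            · exact Or.inl ⟨h, hcol⟩
            · exact Or.inr h
          · rintro (⟨h, hcol⟩ | h)
            · exact ⟨Or.inl h, hcol⟩
            · exact ⟨Or.inr h, hsub h⟩
        have hdisj2 : Disjoint {p | Vv st.2 p ∧ p ∈ gCol land c}
            {p | gReach land ((j : Int), (i : Int)) p} := by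
          rw [Set.disjoint_left]
          rintro p ⟨hp, _⟩ hp2
          exact hdisj p hp2 hp
        have hf1 : ({p : Int × Int | Vv st.2 p ∧ p ∈ gCol land c}).Finite :=
          finite_of_cells (fun p hp => vv_subset_cells hsh hp.1)
        have hf2 : ({p | gReach land ((j : Int), (i : Int)) p}).Finite :=
          finite_of_cells (fun p hp => vv_subset_cells hsh' ((hvv' p).2 (Or.inr hp)))
        rw [if_pos hmem, hset, Set.ncard_union_eq hdisj2 hf1 hf2, harea]
        push_cast
        ring
      · have hset : {p | Vv vis' p ∧ p ∈ gCol land c} = {p | Vv st.2 p ∧ p ∈ gCol land c} := by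
          ext p
          simp only [Set.mem_setOf_eq, hvv' p]
          constructor
          · rintro ⟨h | h, hcol⟩
            · exact ⟨h, hcol⟩
            · exfalso
              obtain ⟨s', hs'oil, hs'c, hs'p⟩ := hcol
              have : s' ∈ {q | gReach land ((j : Int), (i : Int)) q} :=
                h.trans (gReach_symm hs'p)
              exact hmem ((harr _).2 ⟨s', this, hs'c⟩)
          · rintro ⟨h, hcol⟩
            exact ⟨Or.inl h, hcol⟩
        rw [if_neg hmem, hset]
        ring
    · intro p hp
      exact (hvv' p).2 (Or.inl hp)
    · intro _
      exact (hvv' _).2 (Or.inr Relation.ReflTransGen.refl)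
  · -- already visited or no oil here: state unchanged
    rw [pvInner, if_neg hg]
    refine ⟨⟨hsh, hcl, hoil, hlen, hans⟩, fun p hp => hp, ?_⟩
    intro ho
    rcases Decidable.not_and_iff_not_or_not.mp hg with h | h
    · refine ⟨by positivity, by positivity, ?_⟩
      simpa using h
    · exfalso
      apply h
      simpa using ho.2.2.2.2

theorem innerFold {land : List (List Int)} {i : Nat}
    (hi : i < (land.getD 0 []).length) :
    ∀ (js : List Nat) (st : List Int × List (List Int)), (∀ j ∈ js, j < land.length) →
      OuterInv land st →
      OuterInv land
        (js.foldl (pvInner land (land.length : Int) ((land.getD 0 []).length : Int) i) st) ∧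
      (∀ p, Vv st.2 p →
        Vv (js.foldl (pvInner land (land.length : Int) ((land.getD 0 []).length : Int) i) st).2
          p) ∧
      (∀ j ∈ js, gOil land ((j : Int), (i : Int)) →
        Vv (js.foldl (pvInner land (land.length : Int) ((land.getD 0 []).length : Int) i) st).2
          ((j : Int), (i : Int)))
  | [], st, _, hinv => ⟨hinv, fun _ hp => hp, by simp⟩
  | j :: js, st, hjs, hinv => by
    have hc := cellStep hinv hi (hjs j (by simp))
    have ih := innerFold hi js _ (fun j' hj' => hjs j' (by simp [hj'])) hc.1
    refine ⟨ih.1, fun p hp => ih.2.1 p (hc.2.1 p hp), ?_⟩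
    intro j' hj' ho
    rcases List.mem_cons.mp hj' with h | h
    · subst h
      exact ih.2.1 _ (hc.2.2 ho)
    · exact ih.2.2 j' h ho

theorem outerFold {land : List (List Int)} :
    ∀ (cs : List Nat) (st : List Int × List (List Int)),
      (∀ c ∈ cs, c < (land.getD 0 []).length) → OuterInv land st →
      OuterInv land (cs.foldl (fun st i =>
        (List.range land.length).foldl
          (pvInner land (land.length : Int) ((land.getD 0 []).length : Int) i) st) st) ∧
      (∀ p, Vv st.2 p →
        Vv (cs.foldl (fun st i =>
          (List.range land.length).foldl
            (pvInner land (land.length : Int) ((land.getD 0 []).length : Int) i) st) st).2 p) ∧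
      (∀ c ∈ cs, ∀ j : Nat, j < land.length → gOil land ((j : Int), (c : Int)) →
        Vv (cs.foldl (fun st i =>
          (List.range land.length).foldl
            (pvInner land (land.length : Int) ((land.getD 0 []).length : Int) i) st) st).2
          ((j : Int), (c : Int)))
  | [], st, _, hinv => ⟨hinv, fun _ hp => hp, by simp⟩
  | c :: cs, st, hcs, hinv => by
    have hstep := innerFold (hcs c (by simp)) (List.range land.length) st
      (fun j hj => List.mem_range.mp hj) hinv
    have ih := outerFold cs _ (fun c' hc' => hcs c' (by simp [hc'])) hstep.1
    refine ⟨ih.1, fun p hp => ih.2.1 p (hstep.2.1 p hp), ?_⟩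
    intro c' hc' j hjn ho
    rcases List.mem_cons.mp hc' with h | h
    · subst h
      exact ih.2.1 _ (hstep.2.2 j (List.mem_range.mpr hjn) ho)
    · exact ih.2.2 c' h j hjn ho

theorem gCol_oil {land : List (List Int)} {c : Nat} {p : Int × Int}
    (h : p ∈ gCol land c) : gOil land p := by
  obtain ⟨s, hs, _, hr⟩ := h
  exact gReach_oil hs hr

theorem nbrs_near {land : List (List Int)} {p x : Int × Int}
    (hx : x ∈ pvNbrs p) (hp : gOil land p) (hxo : gOil land x) : gNear land p x := by
  refine ⟨hp, hxo, ?_⟩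
  simp only [pvNbrs, List.mem_cons, List.not_mem_nil, or_false] at hx
  rcases hx with h | h | h | h <;> subst h
  · exact Or.inr ⟨rfl, Or.inl rfl⟩
  · exact Or.inr ⟨rfl, Or.inr (by omega)⟩
  · exact Or.inl ⟨rfl, Or.inl rfl⟩
  · exact Or.inl ⟨rfl, Or.inr (by omega)⟩

theorem near_nbrs {land : List (List Int)} {p x : Int × Int} (h : gNear land p x) :
    x ∈ pvNbrs p := by
  obtain ⟨_, _, h3⟩ := h
  rcases h3 with ⟨h1, h2 | h2⟩ | ⟨h1, h2 | h2⟩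
  · have : x = (p.1, p.2 + 1) := Prod.ext (by omega) (by omega)
    simp [pvNbrs, this]
  · have : x = (p.1, p.2 - 1) := Prod.ext (by omega) (by omega)
    simp [pvNbrs, this]
  · have : x = (p.1 + 1, p.2) := Prod.ext (by omega) (by omega)
    simp [pvNbrs, this]
  · have : x = (p.1 - 1, p.2) := Prod.ext (by omega) (by omega)
    simp [pvNbrs, this]

-- the guard tested by pvExpand, as a proposition about the candidate cell
def ExpC (land : List (List Int)) (n m : Int) (cur : PySem.Set (Int × Int))
    (q : Int × Int) : Prop :=
  0 ≤ q.1 ∧ q.1 < n ∧ 0 ≤ q.2 ∧ q.2 < m ∧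
    (land.getD q.1.toNat []).getD q.2.toNat 0 ≠ 0 ∧ ¬ PySem.Set.contains cur q = true

theorem innerF_spec {land : List (List Int)} {n m : Int} {cur : PySem.Set (Int × Int)} :
    ∀ (ns : List (Int × Int)) (acc : PySem.Set (Int × Int)), List.Nodup acc →
      List.Nodup (ns.foldl (fun new q =>
        if 0 ≤ q.1 ∧ q.1 < n ∧ 0 ≤ q.2 ∧ q.2 < m ∧
            (land.getD q.1.toNat []).getD q.2.toNat 0 ≠ 0 ∧
            ¬ PySem.Set.contains cur q = true then
          PySem.Set.add new q
        else new) acc) ∧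
      (∀ x, x ∈ ns.foldl (fun new q =>
        if 0 ≤ q.1 ∧ q.1 < n ∧ 0 ≤ q.2 ∧ q.2 < m ∧
            (land.getD q.1.toNat []).getD q.2.toNat 0 ≠ 0 ∧
            ¬ PySem.Set.contains cur q = true then
          PySem.Set.add new q
        else new) acc ↔ x ∈ acc ∨ (x ∈ ns ∧ ExpC land n m cur x))
  | [], acc, hnd => ⟨hnd, by simp⟩
  | q :: ns, acc, hnd => by
    rw [List.foldl_cons]
    by_cases hq : 0 ≤ q.1 ∧ q.1 < n ∧ 0 ≤ q.2 ∧ q.2 < m ∧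
        (land.getD q.1.toNat []).getD q.2.toNat 0 ≠ 0 ∧
        ¬ PySem.Set.contains cur q = true
    · rw [if_pos hq]
      have ih := innerF_spec (land := land) (n := n) (m := m) (cur := cur) ns
        (PySem.Set.add acc q) (PySem.Set.nodup_add _ _ hnd)
      refine ⟨ih.1, ?_⟩
      intro x
      rw [ih.2 x, PySem.Set.mem_add]
      constructor
      · rintro ((h | h) | h)
        · exact Or.inl h
        · exact Or.inr ⟨by simp [h], h ▸ hq⟩
        · exact Or.inr ⟨by simp [h.1], h.2⟩
      · rintro (h | ⟨hm, hc⟩)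
        · exact Or.inl (Or.inl h)
        · rcases List.mem_cons.mp hm with h | h
          · exact Or.inl (Or.inr h)
          · exact Or.inr ⟨h, hc⟩
    · rw [if_neg hq]
      have ih := innerF_spec (land := land) (n := n) (m := m) (cur := cur) ns acc hnd
      refine ⟨ih.1, ?_⟩
      intro x
      rw [ih.2 x]
      constructor
      · rintro (h | h)
        · exact Or.inl h
        · exact Or.inr ⟨by simp [h.1], h.2⟩
      · rintro (h | ⟨hm, hc⟩)
        · exact Or.inl h
        · rcases List.mem_cons.mp hm with h | h
          · exact absurd (h ▸ hc) hq
          · exact Or.inr ⟨h, hc⟩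

theorem outerF_spec {land : List (List Int)} {n m : Int} {cur : PySem.Set (Int × Int)} :
    ∀ (fr acc : List (Int × Int)), List.Nodup acc →
      List.Nodup (fr.foldl (fun new p =>
        (pvNbrs p).foldl (fun new q =>
          if 0 ≤ q.1 ∧ q.1 < n ∧ 0 ≤ q.2 ∧ q.2 < m ∧
              (land.getD q.1.toNat []).getD q.2.toNat 0 ≠ 0 ∧
              ¬ PySem.Set.contains cur q = true then
            PySem.Set.add new q
          else new) new) acc) ∧
      (∀ x, x ∈ fr.foldl (fun new p =>
        (pvNbrs p).foldl (fun new q =>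
          if 0 ≤ q.1 ∧ q.1 < n ∧ 0 ≤ q.2 ∧ q.2 < m ∧
              (land.getD q.1.toNat []).getD q.2.toNat 0 ≠ 0 ∧
              ¬ PySem.Set.contains cur q = true then
            PySem.Set.add new q
          else new) new) acc ↔
        x ∈ acc ∨ ∃ p ∈ fr, x ∈ pvNbrs p ∧ ExpC land n m cur x)
  | [], acc, hnd => ⟨hnd, by simp⟩
  | p :: fr, acc, hnd => by
    rw [List.foldl_cons]
    have hin := innerF_spec (land := land) (n := n) (m := m) (cur := cur) (pvNbrs p) acc hnd
    have ih := outerF_spec (land := land) (n := n) (m := m) (cur := cur) fr _ hin.1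
    refine ⟨ih.1, ?_⟩
    intro x
    rw [ih.2 x, hin.2 x]
    constructor
    · rintro ((h | h) | h)
      · exact Or.inl h
      · exact Or.inr ⟨p, by simp, h⟩
      · obtain ⟨p', hp', hx⟩ := h
        exact Or.inr ⟨p', by simp [hp'], hx⟩
    · rintro (h | ⟨p', hp', hx⟩)
      · exact Or.inl (Or.inl h)
      · rcases List.mem_cons.mp hp' with h | h
        · exact Or.inl (Or.inr (h ▸ hx))
        · exact Or.inr ⟨p', h, hx⟩

theorem expand_spec {land : List (List Int)} {n m : Int}
    (cur fr : PySem.Set (Int × Int)) :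
    List.Nodup (pvExpand land n m cur fr) ∧
    (∀ x, x ∈ pvExpand land n m cur fr ↔
      ∃ p ∈ fr, x ∈ pvNbrs p ∧ ExpC land n m cur x) := by
  have h := outerF_spec (land := land) (n := n) (m := m) (cur := cur) fr
    PySem.Set.empty List.nodup_nil
  refine ⟨h.1, fun x => ?_⟩
  rw [pvExpand] at *
  rw [h.2 x]
  simp [PySem.Set.empty]

-- invariant of the while-frontier loop of B
def SatInv (land : List (List Int)) (c : Nat) (fuel : Nat)
    (cur frontier : PySem.Set (Int × Int)) : Prop :=
  List.Nodup cur ∧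
  (∀ x, gOil land x → x.2 = (c : Int) → x ∈ cur) ∧
  (∀ x ∈ cur, x ∈ gCol land c) ∧
  (∀ x ∈ frontier, x ∈ cur) ∧
  (∀ x ∈ cur, x ∉ frontier → ∀ r, gNear land x r → r ∈ cur) ∧
  (frontier ≠ [] →
    land.length * (land.getD 0 []).length + 1 ≤ fuel + cur.length)

theorem sat_exit {land : List (List Int)} {c : Nat} {cur : PySem.Set (Int × Int)}
    (hnd : List.Nodup cur) (hseed : ∀ x, gOil land x → x.2 = (c : Int) → x ∈ cur)
    (hcol : ∀ x ∈ cur, x ∈ gCol land c)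
    (hclosed : ∀ x ∈ cur, ∀ r, gNear land x r → r ∈ cur) :
    List.Nodup cur ∧ ∀ x, x ∈ cur ↔ x ∈ gCol land c := by
  refine ⟨hnd, fun x => ⟨hcol x, ?_⟩⟩
  rintro ⟨s, hs, hsc, hr⟩
  induction hr with
  | refl => exact hseed _ hs hsc
  | tail _ hn ih => exact hclosed _ ih _ hn

theorem sat_spec {land : List (List Int)} {c : Nat} :
    ∀ (fuel : Nat) (cur frontier : PySem.Set (Int × Int)),
      SatInv land c fuel cur frontier →
      List.Nodup (pvSat land (land.length : Int) ((land.getD 0 []).length : Int)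
        fuel cur frontier) ∧
      ∀ x, x ∈ pvSat land (land.length : Int) ((land.getD 0 []).length : Int)
        fuel cur frontier ↔ x ∈ gCol land c
  | 0, cur, frontier, hinv => by
    obtain ⟨hnd, hseed, hcol, hfc, hcl, hfu⟩ := hinv
    have hfr : frontier = [] := by
      by_contra hne
      have h1 := hfu hne
      have h2 : cur.length ≤ land.length * (land.getD 0 []).length := by
        rw [← List.toFinset_card_of_nodup hnd, ← card_cellsF land]
        apply Finset.card_le_card
        intro x hx
        rw [List.mem_toFinset] at hx
        rw [mem_cellsF]
        have := gOil_bounds (gCol_oil (hcol x hx))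
        omega
      omega
    subst hfr
    rw [pvSat]
    exact sat_exit hnd hseed hcol (fun x hx r hr => hcl x hx (List.not_mem_nil) r hr)
  | fuel + 1, cur, frontier, hinv => by
    obtain ⟨hnd, hseed, hcol, hfc, hcl, hfu⟩ := hinv
    by_cases hfr : frontier = []
    · subst hfr
      rw [pvSat, if_pos rfl]
      exact sat_exit hnd hseed hcol (fun x hx r hr => hcl x hx (List.not_mem_nil) r hr)
    · rw [pvSat, if_neg hfr]
      have hexp := expand_spec (land := land) (n := (land.length : Int))
        (m := ((land.getD 0 []).length : Int)) cur frontier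
      set new := pvExpand land (land.length : Int) ((land.getD 0 []).length : Int)
        cur frontier with hnew
      have hnotin : ∀ x ∈ new, x ∉ cur := by
        intro x hx
        obtain ⟨_, _, _, hc⟩ := (hexp.2 x).1 hx
        rw [← PySem.Set.contains_iff]
        exact hc.2.2.2.2.2
      have hunion : PySem.Set.union cur new = cur ++ new :=
        PySem.Set.update_eq_append_of_disjoint cur new hexp.1 hnotin
      have hnewcol : ∀ x ∈ new, x ∈ gCol land c := by
        intro x hx
        obtain ⟨p, hp, hnb, hc⟩ := (hexp.2 x).1 hx
        have hpcol := hcol p (hfc p hp)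
        have hpo := gCol_oil hpcol
        have hxo : gOil land x := ⟨hc.1, hc.2.1, hc.2.2.1, hc.2.2.2.1, hc.2.2.2.2.1⟩
        obtain ⟨s, hso, hsc, hsr⟩ := hpcol
        exact ⟨s, hso, hsc, hsr.tail (nbrs_near hnb hpo hxo)⟩
      have hinv' : SatInv land c fuel (PySem.Set.union cur new) new := by
        rw [hunion]
        refine ⟨?_, ?_, ?_, ?_, ?_, ?_⟩
        · exact List.Nodup.append hnd hexp.1 (fun x hx1 hx2 => hnotin x hx2 hx1)
        · intro x h1 h2
          exact List.mem_append_left _ (hseed x h1 h2)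
        · intro x hx
          rcases List.mem_append.mp hx with h | h
          · exact hcol x h
          · exact hnewcol x h
        · intro x hx
          exact List.mem_append_right _ hx
        · intro x hx hnf r hr
          rcases List.mem_append.mp hx with h | h
          · rw [List.mem_append]
            by_cases hxf : x ∈ frontier
            · by_cases hrc : r ∈ cur
              · exact Or.inl hrc
              · refine Or.inr ((hexp.2 r).2 ⟨x, hxf, near_nbrs hr, ?_⟩)
                have hb := gOil_bounds hr.2.1
                refine ⟨hb.1, hb.2.1, hb.2.2.1, hb.2.2.2, hr.2.1.2.2.2.2, ?_⟩
                exact fun hcc => hrc ((PySem.Set.contains_iff _ _).mp hcc)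
            · exact Or.inl (hcl x h hxf r hr)
          · exact absurd h hnf
        · intro hne
          have h1 := hfu hfr
          have h2 : 0 < new.length := List.length_pos_of_ne_nil hne
          rw [List.length_append]
          omega
      exact sat_spec fuel _ _ hinv'
theorem solution_alt_eq (land : List (List Int)) (_h : Pre_solution land) :
    solution_alt land =
      (List.range (land.getD 0 []).length).foldl (fun b c => max b (gCount land c : Int)) 0 := by
  simp only [solution_alt, Int.toNat_natCast]
  apply PySem.List.foldl_congr_mem
  intro acc c hc
  have hcM : c < (land.getD 0 []).length := List.mem_range.mp hc
  congr 1
  set seedL := (List.range land.length).filterMap (fun i =>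
    if (land.getD i []).getD c 0 ≠ 0 then some ((i : Int), (c : Int)) else none) with hseedL
  have hseedmem : ∀ x, x ∈ PySem.Set.ofList seedL ↔ gOil land x ∧ x.2 = (c : Int) := by
    intro x
    rw [PySem.Set.mem_ofList, hseedL, List.mem_filterMap]
    constructor
    · rintro ⟨i, hi, heq⟩
      split_ifs at heq with hval
      · obtain rfl : ((i : Int), (c : Int)) = x := Option.some_injective _ heq
        have hiN := List.mem_range.mp hi
        refine ⟨⟨by positivity, by show (i : Int) < (land.length : Int); exact_mod_cast hiN,
          by positivity,
          by show (c : Int) < ((land.getD 0 []).length : Int); exact_mod_cast hcM, ?_⟩, rfl⟩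
        simpa using hval
    · rintro ⟨hoil, hcol⟩
      have hb := gOil_bounds hoil
      refine ⟨x.1.toNat, List.mem_range.mpr (by omega), ?_⟩
      rw [if_pos ?_]
      · congr 1
        refine Prod.ext ?_ ?_
        · show ((x.1.toNat : Int)) = x.1
          omega
        · show ((c : Int)) = x.2
          exact hcol.symm
      · have := hoil.2.2.2.2
        rw [hcol] at this
        simpa using this
  have hinv : SatInv land c (land.length * (land.getD 0 []).length + 1)
      (PySem.Set.ofList seedL) (PySem.Set.ofList seedL) := by
    refine ⟨PySem.Set.nodup_ofList _, ?_, ?_, fun x hx => hx, ?_, ?_⟩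
    · intro x h1 h2
      exact (hseedmem x).2 ⟨h1, h2⟩
    · intro x hx
      obtain ⟨hoil, hcol⟩ := (hseedmem x).1 hx
      exact ⟨x, hoil, hcol, Relation.ReflTransGen.refl⟩
    · intro x hx hnf
      exact absurd hx hnf
    · intro _
      omega
  have hsat := sat_spec (land := land) (c := c)
    (land.length * (land.getD 0 []).length + 1) (PySem.Set.ofList seedL)
    (PySem.Set.ofList seedL) hinv
  set R := pvSat land (land.length : Int) ((land.getD 0 []).length : Int)
    (land.length * (land.getD 0 []).length + 1) (PySem.Set.ofList seedL)
    (PySem.Set.ofList seedL) with hR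
  have hfs : gCol land c = ↑R.toFinset := by
    ext x
    rw [Finset.mem_coe, List.mem_toFinset, hsat.2 x]
  rw [gCount, hfs, Set.ncard_coe_finset, List.toFinset_card_of_nodup hsat.1]

theorem maxD_eq_foldl {L : List Int} (hne : L ≠ []) (h0 : ∀ x ∈ L, 0 ≤ x) :
    (PySem.List.max? L (fun v => v)).getD 0 = L.foldl max 0 := by
  obtain ⟨x, t, rfl⟩ := List.exists_cons_of_ne_nil hne
  rw [PySem.List.max?_id_cons]
  simp only [Option.getD_some, List.foldl_cons]
  rw [max_eq_right (h0 x (by simp))]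

theorem solution_eq (land : List (List Int)) (h : Pre_solution land) :
    solution land =
      (List.range (land.getD 0 []).length).foldl (fun b c => max b (gCount land c : Int)) 0 := by
  obtain ⟨hne, hM, _⟩ := h
  have hvv0 : ∀ p, ¬ Vv (List.replicate land.length
      (List.replicate (land.getD 0 []).length (0 : Int))) p := by
    rintro p ⟨_, _, h3⟩
    apply h3
    rw [getD_replicate]
    split_ifs
    · rw [getD_replicate]
      split_ifs <;> rfl
    · rfl
  have hinv0 : OuterInv land (List.replicate (land.getD 0 []).length (0 : Int),
      List.replicate land.length (List.replicate (land.getD 0 []).length (0 : Int))) := by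
    refine ⟨⟨by simp, ?_⟩, ?_, ?_, by simp, ?_⟩
    · intro r hr
      rw [List.eq_of_mem_replicate hr]
      simp
    · intro p r hp _
      exact absurd hp (hvv0 p)
    · intro p hp
      exact absurd hp (hvv0 p)
    · intro c hc
      have hempty : {p | Vv (List.replicate land.length
          (List.replicate (land.getD 0 []).length (0 : Int))) p ∧ p ∈ gCol land c} = ∅ := by
        ext p
        simp only [Set.mem_setOf_eq, Set.mem_empty_iff_false, iff_false, not_and]
        intro hp
        exact absurd hp (hvv0 p)
      simp only [hempty, Set.ncard_empty, Nat.cast_zero]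
      rw [getD_replicate, if_pos hc]
  have hout := outerFold (List.range (land.getD 0 []).length) _
    (fun c hc => List.mem_range.mp hc) hinv0
  set final := (List.range (land.getD 0 []).length).foldl (fun st i =>
    (List.range land.length).foldl
      (pvInner land (land.length : Int) ((land.getD 0 []).length : Int) i) st)
    (List.replicate (land.getD 0 []).length (0 : Int),
      List.replicate land.length (List.replicate (land.getD 0 []).length (0 : Int)))
    with hfinal
  obtain ⟨⟨hshF, _, _, hlenF, hansF⟩, _, hcovF⟩ := hout
  have hcov : ∀ p, gOil land p → Vv final.2 p := by
    intro p hp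
    have hb := gOil_bounds hp
    have hpeq : p = ((p.1.toNat : Int), (p.2.toNat : Int)) :=
      Prod.ext (by omega) (by omega)
    rw [hpeq]
    exact hcovF p.2.toNat (List.mem_range.mpr (by omega)) p.1.toNat (by omega)
      (hpeq ▸ hp)
  have hcount : ∀ c : Nat, c < (land.getD 0 []).length →
      final.1.getD c 0 = (gCount land c : Int) := by
    intro c hc
    rw [hansF c hc]
    have : {p | Vv final.2 p ∧ p ∈ gCol land c} = gCol land c := by
      ext p
      simp only [Set.mem_setOf_eq, and_iff_right_iff_imp]
      intro hp
      exact hcov p (gCol_oil hp)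
    rw [this]
    rfl
  have hlist : final.1 = (List.range (land.getD 0 []).length).map
      (fun c => (gCount land c : Int)) := by
    apply List.ext_getElem (by simp [hlenF])
    intro i h1 h2
    have hi : i < (land.getD 0 []).length := by rwa [hlenF] at h1
    rw [← List.getD_eq_getElem final.1 0 h1, hcount i hi]
    simp
  simp only [solution, Int.toNat_natCast]
  rw [show (List.range ((land.getD 0 []).length)).foldl (fun st i =>
      (List.range land.length).foldl
        (pvInner land (land.length : Int) ((land.getD 0 []).length : Int) i) st)
      (List.replicate (land.getD 0 []).length (0 : Int),
        List.replicate land.length (List.replicate (land.getD 0 []).length (0 : Int))) = final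
    from rfl]
  rw [hlist, maxD_eq_foldl]
  · rw [List.foldl_map]
  · intro hL
    have : (land.getD 0 []).length = 0 := by simpa using congrArg List.length hL
    omega
  · intro x hx
    simp only [List.mem_map] at hx
    obtain ⟨c, _, rfl⟩ := hx
    positivity

-- ===== VERDICT (by name: the statement is the Claim_ definition above) =====
theorem solution_spec : Claim_equal_solution := by
  intro land _ hpre
  unfold Spec_solution
  rw [solution_eq land hpre, solution_alt_eq land hpre]
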